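-- pv_equiv track=rewrite | github.com/twok1/python_pokolenie_algs | p4-2.py | min_digit_sum
-- ===== SOURCE A (Python) =====
-- def min_digit_sum(a, b):
--     def sum_digits(num):
--         if num < 10:
--             return num
--         return sum_digits(num // 10) + num % 10
--     prom = tuple(sum_digits(i) for i in range(a, b+1))
--     m = min(prom)
--     result = tuple(1 if i == m else 0 for i in prom)
--     return(sum(result))
-- ===== SOURCE B (Python) =====
-- def min_digit_sum(a, b):
--     m = None
--     c = 0
--     for i in range(a, b + 1):
--         num, s = i, 0
--         while num >= 10:
--             s += num % 10
--             num //= 10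
--         s += num
--         if m is None or s < m:
--             m, c = s, 1
--         elif s == m:
--             c += 1
--     return c
-- ===== Notes on version B (the rewrite author's own statement) =====
-- stated objective: simpler
-- what changed: B replaces A's three passes (build the full tuple of digit sums, take min, build a 0/1 indicator tuple and sum it) and recursive digit sum by one fold that keeps only the running minimum and its count, with an iterative digit sum; no intermediate tuples are materialised.
import Mathlib
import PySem

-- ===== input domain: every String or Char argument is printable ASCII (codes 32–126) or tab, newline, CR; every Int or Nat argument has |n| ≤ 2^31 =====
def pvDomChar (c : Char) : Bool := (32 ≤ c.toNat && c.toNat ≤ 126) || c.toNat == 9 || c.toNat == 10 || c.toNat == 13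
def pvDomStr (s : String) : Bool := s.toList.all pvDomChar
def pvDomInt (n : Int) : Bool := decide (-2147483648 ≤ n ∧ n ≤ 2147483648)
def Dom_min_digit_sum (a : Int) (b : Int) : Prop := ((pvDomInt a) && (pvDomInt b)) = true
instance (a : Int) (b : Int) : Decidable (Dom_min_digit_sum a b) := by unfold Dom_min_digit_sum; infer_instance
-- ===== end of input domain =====

-- B replaces A's three passes (tuple of digit sums, min, 0/1 indicator tuple summed) by one
-- fold keeping only the running minimum and its count, with an iterative digit sum: simpler, O(1) space.

-- termination measure lemma, cited by both ports' decreasing_by (kept small so the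
-- definitions do not embed a large proof term)
theorem pvFloorDivTenLt (num : Int) (h : ¬ num < 10) :
    (PySem.Int.floordiv num 10).toNat < num.toNat := by
  rw [PySem.Int.floordiv_eq_ediv_of_pos (by norm_num)]
  omega

-- ===== PORT A =====
-- A's recursive sum_digits (Python returns num itself whenever num < 10, including negatives)
def pvSumDigits (num : Int) : Int :=
  if num < 10 then num
  else pvSumDigits (PySem.Int.floordiv num 10) + PySem.Int.mod num 10
termination_by num.toNat
decreasing_by
  exact pvFloorDivTenLt num (by omega)

def min_digit_sum (a : Int) (b : Int) : Int :=
  let prom := (PySem.List.pyRange a (b + 1) 1).map pvSumDigits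
  let m := (PySem.List.min? prom (fun x => x)).getD 0   -- min([]) raises ValueError; Pre_ excludes a > b
  (prom.map (fun i => if i = m then (1 : Int) else 0)).sum

-- ===== PORT B =====
-- B's inner while loop: while num >= 10: s += num % 10; num //= 10; then s + num
def pvDigitSumIter (num : Int) (s : Int) : Int :=
  if 10 ≤ num then pvDigitSumIter (PySem.Int.floordiv num 10) (s + PySem.Int.mod num 10)
  else s + num
termination_by num.toNat
decreasing_by
  exact pvFloorDivTenLt num (by omega)

-- one step of B's loop body on the state (m, c) with the freshly computed digit sum s
def pvStep (acc : Option Int × Int) (s : Int) : Option Int × Int :=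
  match acc with
  | (none, _) => (some s, 1)
  | (some m, c) => if s < m then (some s, 1) else if s = m then (some m, c + 1) else (some m, c)

def min_digit_sum_alt (a : Int) (b : Int) : Int :=
  ((PySem.List.pyRange a (b + 1) 1).foldl
    (fun acc i => pvStep acc (pvDigitSumIter i 0)) (none, 0)).2

-- ===== PRECONDITION & SPEC =====
-- Pre_ excludes a > b, where min() of the empty tuple raises ValueError in A.
def Pre_min_digit_sum (a : Int) (b : Int) : Prop := a ≤ b
instance (a : Int) (b : Int) : Decidable (Pre_min_digit_sum a b) := by unfold Pre_min_digit_sum; infer_instance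

def pvWitness_min_digit_sum : Int × Int := (3, 17)

def Spec_min_digit_sum (a : Int) (b : Int) (out : Int) : Prop := out = min_digit_sum_alt a b
instance (a : Int) (b : Int) (out : Int) : Decidable (Spec_min_digit_sum a b out) := by unfold Spec_min_digit_sum; infer_instance

-- ===== CLAIM (what is proved, stated in full; the proofs are below) =====
def Claim_equal_min_digit_sum : Prop := ∀ (a : Int) (b : Int), Dom_min_digit_sum a b → Pre_min_digit_sum a b → Spec_min_digit_sum a b (min_digit_sum a b)
-- ===== LEMMAS AND PROOFS =====

-- B's iterative digit sum agrees with A's recursive one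
theorem pvDigitSumIter_eq (num s : Int) : pvDigitSumIter num s = s + pvSumDigits num := by
  fun_induction pvDigitSumIter num s with
  | case1 num s h ih =>
      rw [pvSumDigits]
      rw [if_neg (by omega)]
      omega
  | case2 num s h =>
      rw [pvSumDigits, if_pos (by omega)]

-- characterisation of B's fold from a seeded state: it tracks the running min and its count
theorem foldl_pvStep (l : List Int) (m c : Int) :
    l.foldl pvStep (some m, c) =
      (some (l.foldl min m),
       (if l.foldl min m = m then c else 0) + l.count (l.foldl min m)) := by
  induction l generalizing m c with
  | nil => simp
  | cons x t ih =>
      simp only [List.foldl_cons, List.count_cons]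
      by_cases h1 : x < m
      · have hmin : min m x = x := by omega
        have hle := (PySem.List.foldl_min_le t x).1
        rw [show pvStep (some m, c) x = (some x, 1) by simp [pvStep, h1]]
        simp only [hmin]
        rw [ih]
        simp only [Prod.mk.injEq, beq_iff_eq]
        refine ⟨trivial, ?_⟩
        push_cast
        split_ifs <;> omega
      · by_cases h2 : x = m
        · have hmin : min m x = m := by omega
          rw [show pvStep (some m, c) x = (some m, c + 1) by simp [pvStep, h2]]
          simp only [hmin]
          rw [ih]
          simp only [Prod.mk.injEq, beq_iff_eq]
          refine ⟨trivial, ?_⟩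
          push_cast
          split_ifs <;> omega
        · have hmin : min m x = m := by omega
          have hle := (PySem.List.foldl_min_le t m).1
          rw [show pvStep (some m, c) x = (some m, c) by simp [pvStep, h1, h2]]
          simp only [hmin]
          rw [ih]
          simp only [Prod.mk.injEq, beq_iff_eq]
          refine ⟨trivial, ?_⟩
          push_cast
          split_ifs <;> omega

-- a 0/1 indicator sum is a count
theorem sum_indicator_count (l : List Int) (m : Int) :
    (l.map (fun i => if i = m then (1 : Int) else 0)).sum = l.count m := by
  induction l with
  | nil => simp
  | cons x t ih =>
      simp only [List.map_cons, List.sum_cons, List.count_cons, ih, beq_iff_eq]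
      push_cast
      split_ifs <;> omega

-- B's fold over the raw range equals the fold of pvStep over the mapped digit sums
theorem foldl_pvStep_map (t : List Int) (m : Int) (c : Int) :
    t.foldl (fun acc i => pvStep acc (pvSumDigits i)) (some m, c) =
      (t.map pvSumDigits).foldl pvStep (some m, c) :=
  List.foldl_map.symm

-- ===== VERDICT (by name: the statement is the Claim_ definition above) =====
theorem min_digit_sum_spec : Claim_equal_min_digit_sum := by
  intro a b _ hpre
  unfold Pre_min_digit_sum at hpre
  unfold Spec_min_digit_sum min_digit_sum min_digit_sum_alt
  have hcons : PySem.List.pyRange a (b + 1) 1 = a :: PySem.List.pyRange (a + 1) (b + 1) 1 :=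
    PySem.List.pyRange_one_cons (by omega)
  rw [hcons]
  simp only [List.map_cons, List.foldl_cons, List.sum_cons, PySem.List.min?_id_cons,
    Option.getD_some, pvDigitSumIter_eq, zero_add]
  rw [show pvStep (none, 0) (pvSumDigits a) = (some (pvSumDigits a), 1) from rfl]
  try simp only [show (fun y : Int => y) = id from rfl, List.map_id]
  rw [foldl_pvStep_map, foldl_pvStep]
  dsimp only
  rw [sum_indicator_count]
  split_ifs <;> omega
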